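-- pv_equiv track=rewrite | github.com/kai3n/Daily-commit-project | jamespak/week10/2395. Find Subarrays With Equal Sum.py | findSubarrays
-- ===== SOURCE A (Python) =====
-- from typing import List
--
-- def findSubarrays(nums: List[int]) -> bool:
--     if len(nums) <= 1:
--         return False
--
--     s = set()
--     for i in range(1, len(nums)):
--         if nums[i - 1] + nums[i] in s:
--             return True
--         s.add(nums[i - 1] + nums[i])
--     return False
-- ===== SOURCE B (Python) =====
-- def findSubarrays(nums):
--     sums = sorted(a + b for a, b in zip(nums, nums[1:]))
--     return any(x == y for x, y in zip(sums, sums[1:]))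
-- ===== Notes on version B (the rewrite author's own statement) =====
-- stated objective: alternative
-- what changed: Replaces A's streaming hash-set membership loop with early return by sort-then-scan: sort the consecutive pair sums and report whether any two adjacent sorted sums are equal.
import Mathlib
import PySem

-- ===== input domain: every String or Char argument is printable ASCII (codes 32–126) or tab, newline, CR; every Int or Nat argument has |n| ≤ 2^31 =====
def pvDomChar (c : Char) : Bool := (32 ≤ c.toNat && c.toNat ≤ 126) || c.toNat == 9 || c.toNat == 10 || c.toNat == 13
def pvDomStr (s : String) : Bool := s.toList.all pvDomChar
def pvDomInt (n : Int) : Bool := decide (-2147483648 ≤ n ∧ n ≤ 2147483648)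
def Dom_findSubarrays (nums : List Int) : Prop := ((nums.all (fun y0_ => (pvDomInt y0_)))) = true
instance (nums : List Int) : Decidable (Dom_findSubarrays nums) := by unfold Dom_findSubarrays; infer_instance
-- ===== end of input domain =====

-- B replaces A's streaming seen-set with early return by a sort-then-scan: sort the pair sums, then report any adjacent equal pair (alternative; not faster).

-- ===== PORT A =====
-- the loop 'for i in range(1, len(nums))' carried as structural recursion over the tail,
-- with 'prev' = nums[i-1]; state (s, prev) is exactly A's loop state
def findSubarraysGo (s : PySem.Set Int) (prev : Int) : List Int → Bool
  | [] => false
  | x :: rest =>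
    if PySem.Set.contains s (prev + x) then true
    else findSubarraysGo (PySem.Set.add s (prev + x)) x rest

def findSubarrays (nums : List Int) : Bool :=
  if nums.length ≤ 1 then false
  else
    match nums with
    | [] => false
    | x :: rest => findSubarraysGo PySem.Set.empty x rest

-- ===== PORT B =====
-- sums = sorted(a + b for a, b in zip(nums, nums[1:])); any(x == y for x, y in zip(sums, sums[1:]))
def findSubarrays_alt (nums : List Int) : Bool :=
  let sums := PySem.List.sorted ((nums.zip nums.tail).map (fun p => p.1 + p.2)) (fun x => x) false
  (sums.zip sums.tail).any (fun p => p.1 == p.2)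

-- ===== PRECONDITION & SPEC =====
def Spec_findSubarrays (nums : List Int) (out : Bool) : Prop := out = findSubarrays_alt nums
instance (nums : List Int) (out : Bool) : Decidable (Spec_findSubarrays nums out) := by unfold Spec_findSubarrays; infer_instance

-- ===== CLAIM =====
def Claim_equal_findSubarrays : Prop := ∀ (nums : List Int), Dom_findSubarrays nums → Spec_findSubarrays nums (findSubarrays nums)

-- ===== LEMMAS AND PROOFS =====

-- the list of consecutive pair sums, as A's loop visits them
def pairSums (prev : Int) : List Int → List Int
  | [] => []
  | x :: rest => (prev + x) :: pairSums x rest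

lemma pairSums_eq_zip (xs : List Int) : ∀ prev : Int,
    ((prev :: xs).zip xs).map (fun p => p.1 + p.2) = pairSums prev xs := by
  induction xs with
  | nil => intro prev; simp [pairSums]
  | cons x rest ih =>
    intro prev
    show (prev + x) :: ((x :: rest).zip rest).map (fun p => p.1 + p.2) = _
    rw [ih x]; rfl

lemma go_true_iff (xs : List Int) : ∀ (s : PySem.Set Int) (prev : Int),
    findSubarraysGo s prev xs = true ↔
      ((∃ a ∈ pairSums prev xs, a ∈ s) ∨ ¬ (pairSums prev xs).Nodup) := by
  induction xs with
  | nil => intro s prev; simp [findSubarraysGo, pairSums]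
  | cons x rest ih =>
    intro s prev
    by_cases h : (prev + x) ∈ s
    · have hc : PySem.Set.contains s (prev + x) = true := (PySem.Set.contains_iff s _).mpr h
      simp only [findSubarraysGo, hc, if_true, pairSums, true_iff]
      exact Or.inl ⟨prev + x, List.mem_cons_self, h⟩
    · have hc : PySem.Set.contains s (prev + x) = false := by
        cases hb : PySem.Set.contains s (prev + x)
        · rfl
        · exact absurd ((PySem.Set.contains_iff s _).mp hb) h
      simp only [findSubarraysGo, hc, Bool.false_eq_true, if_false, ih, pairSums,
        List.nodup_cons, List.mem_cons, not_and_or]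
      constructor
      · rintro (⟨a, ha, hmem⟩ | hnd)
        · rcases (PySem.Set.mem_add s (prev + x) a).mp hmem with hs | hv
          · exact Or.inl ⟨a, Or.inr ha, hs⟩
          · subst hv; exact Or.inr (Or.inl (by simpa using ha))
        · exact Or.inr (Or.inr hnd)
      · rintro (⟨a, ha | ha, hs⟩ | hni | hnd)
        · exact absurd (ha ▸ hs) h
        · exact Or.inl ⟨a, ha, (PySem.Set.mem_add s _ a).mpr (Or.inl hs)⟩
        · have hv : (prev + x) ∈ pairSums x rest := by
            by_contra hx; exact hni (by simpa using hx)
          exact Or.inl ⟨prev + x, hv, (PySem.Set.mem_add s _ _).mpr (Or.inr rfl)⟩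
        · exact Or.inr hnd

-- the adjacent-equality scan detects exactly a failure of IsChain (· ≠ ·)
lemma adjEq_iff : ∀ (ys : List Int),
    ((ys.zip ys.tail).any (fun p => p.1 == p.2) = true) ↔ ¬ List.IsChain (· ≠ ·) ys
  | [] => by simp
  | [a] => by simp
  | a :: b :: t => by
    show ((a, b) :: ((b :: t).zip t)).any (fun p => p.1 == p.2) = true ↔ _
    rw [List.isChain_cons_cons]
    by_cases h : a = b
    · simp [h]
    · simp only [List.any_cons, Bool.or_eq_true, beq_iff_eq, h, false_or, not_and_or]
      rw [show ((b :: t).zip t) = ((b :: t).zip (b :: t).tail) from rfl, adjEq_iff (b :: t)]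
      tauto

lemma chain_lt_of_le_ne : ∀ (l : List Int),
    List.IsChain (· ≤ ·) l → List.IsChain (· ≠ ·) l → List.IsChain (· < ·) l
  | [], _, _ => List.isChain_nil
  | [_], _, _ => List.isChain_singleton _
  | a :: b :: t, h1, h2 => by
    rw [List.isChain_cons_cons] at h1 h2 ⊢
    exact ⟨lt_of_le_of_ne h1.1 h2.1, chain_lt_of_le_ne (b :: t) h1.2 h2.2⟩

lemma isChain_of_pairwise_ne : ∀ (l : List Int), l.Pairwise (· ≠ ·) → List.IsChain (· ≠ ·) l
  | [], _ => .nil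
  | [_], _ => .singleton _
  | a :: b :: t, h => by
    rw [List.isChain_cons_cons]
    rw [List.pairwise_cons] at h
    exact ⟨h.1 b List.mem_cons_self, isChain_of_pairwise_ne (b :: t) h.2⟩


-- on a (≤)-sorted list, no adjacent duplicates ↔ no duplicates at all
lemma chain_ne_iff_nodup (ys : List Int) (hs : ys.Pairwise (· ≤ ·)) :
    List.IsChain (· ≠ ·) ys ↔ ys.Nodup := by
  constructor
  · intro h
    have hlt : ys.Pairwise (· < ·) :=
      List.isChain_iff_pairwise.mp
        (chain_lt_of_le_ne ys (List.isChain_iff_pairwise.mpr hs) h)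
    exact hlt.imp (fun hab => ne_of_lt hab)
  · intro h
    exact isChain_of_pairwise_ne ys h

lemma alt_true_iff (nums : List Int) :
    findSubarrays_alt nums = true ↔
      ¬ ((nums.zip nums.tail).map (fun p => p.1 + p.2)).Nodup := by
  unfold findSubarrays_alt
  set sums := (nums.zip nums.tail).map (fun p => p.1 + p.2) with hsums
  have hperm := PySem.List.sorted_perm sums (fun x : Int => x) false
  have hpair : (PySem.List.sorted sums (fun x : Int => x) false).Pairwise (· ≤ ·) := by
    simpa using PySem.List.sorted_pairwise sums (fun x : Int => x)
  rw [adjEq_iff, chain_ne_iff_nodup _ hpair, hperm.nodup_iff]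

-- ===== VERDICT =====
theorem findSubarrays_spec : Claim_equal_findSubarrays := by
  intro nums _
  unfold Spec_findSubarrays
  rw [Bool.eq_iff_iff]
  match nums with
  | [] => simp [findSubarrays, findSubarrays_alt, PySem.List.sorted]
  | [x] => simp [findSubarrays, findSubarrays_alt, PySem.List.sorted]
  | x :: y :: rest =>
    have hlen : ¬ (x :: y :: rest).length ≤ 1 := by simp
    rw [findSubarrays, if_neg hlen]
    rw [go_true_iff, alt_true_iff]
    have : (x :: y :: rest).tail = y :: rest := rfl
    rw [this, pairSums_eq_zip]
    simp [PySem.Set.empty]
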